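-- pv_equiv track=rewrite | github.com/nachoregulardude/token-mapper | script.py | cleaner
-- ===== SOURCE A (Python) =====
-- def cleaner(villages):
--     count = 0
--     clean_villages = []
--     for v in villages:
--         if ',' in v:
--             l = []
--             for x in v.split(','):
--                 if x.strip() not in l:
--                     l.append(x.strip())
--             v = ', '.join(l).strip() if len(l) > 1 else l[0]
--             count += 1
--         clean_villages.append(v)
--
--     return count, clean_villages
-- ===== SOURCE B (Python) =====
-- def cleaner(villages):
--     def dedup(v):
--         toks = [x.strip() for x in v.split(',')]
--         l = sorted(set(toks), key=toks.index)
--         return ', '.join(l).strip() if len(l) > 1 else l[0]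
--
--     clean = [dedup(v) if ',' in v else v for v in villages]
--     return sum(',' in v for v in villages), clean
-- ===== Notes on version B (the rewrite author's own statement) =====
-- stated objective: alternative
-- what changed: B dedups each village's stripped tokens by sorting the distinct-token set by first-occurrence index (sorted(set(toks), key=toks.index)) instead of A's incremental membership-test-and-append loop, counts modified villages by a separate sum over comma tests, and builds the cleaned list as a comprehension mapping a pure helper.
import Mathlib
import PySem

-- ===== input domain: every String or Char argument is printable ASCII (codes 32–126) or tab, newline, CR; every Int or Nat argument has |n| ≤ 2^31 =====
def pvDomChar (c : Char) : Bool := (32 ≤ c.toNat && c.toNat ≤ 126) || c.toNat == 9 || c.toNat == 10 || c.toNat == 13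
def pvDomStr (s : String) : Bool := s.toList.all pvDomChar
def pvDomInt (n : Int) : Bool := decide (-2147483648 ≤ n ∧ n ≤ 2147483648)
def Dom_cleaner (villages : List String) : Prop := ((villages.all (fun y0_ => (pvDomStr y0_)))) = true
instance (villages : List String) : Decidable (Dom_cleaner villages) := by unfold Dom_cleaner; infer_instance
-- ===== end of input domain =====

-- B: dedups each village's tokens by sorting the distinct-token set by first-occurrence
-- index (sorted(set(toks), key=toks.index)) instead of A's membership-append loop,
-- with the count as a separate sum (alternative algorithm, similar cost).


-- s.split(",") for the nonempty separator "," — exact wrapper over PySem.Chars.splitOn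
def pySplitComma (v : String) : List String := (PySem.Chars.splitOn v.toList [',']).map String.ofList

-- ===== PORT A =====
-- literal port of A's loop: threaded (count, clean_villages) accumulator;
-- inner dedup loop 'if x.strip() not in l: l.append(x.strip())';
-- l is never empty (split returns ≥ 1 piece), so l[0] is ported as headD "".
def cleaner (villages : List String) : Int × List String :=
  villages.foldl (fun acc v =>
    if PySem.Str.isIn "," v then
      let l := (pySplitComma v).foldl
        (fun (l : List String) x =>
          if l.contains (PySem.Str.strip x) then l else l ++ [PySem.Str.strip x]) []
      let v' := if l.length > 1 then PySem.Str.strip (PySem.Str.join ", " l) else l.headD ""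
      (acc.1 + 1, acc.2 ++ [v'])
    else (acc.1, acc.2 ++ [v])) (0, [])

-- ===== PORT B =====
-- per-village helper: sorted(set(toks), key=toks.index); every element of set(toks)
-- is in toks, so Python's toks.index never raises and is exactly List.idxOf here.
def dedupV (v : String) : String :=
  let toks := (pySplitComma v).map PySem.Str.strip
  let l := PySem.List.sorted (PySem.Set.ofList toks) (fun t => List.idxOf t toks)
  if l.length > 1 then PySem.Str.strip (PySem.Str.join ", " l) else l.headD ""

def cleaner_alt (villages : List String) : Int × List String :=
  ((villages.countP (fun v => PySem.Str.isIn "," v) : Int),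
   villages.map (fun v => if PySem.Str.isIn "," v then dedupV v else v))

-- ===== PRECONDITION & SPEC =====
def Spec_cleaner (villages : List String) (out : Int × List String) : Prop := out = cleaner_alt villages
instance (villages : List String) (out : Int × List String) : Decidable (Spec_cleaner villages out) := by unfold Spec_cleaner; infer_instance

-- ===== CLAIM =====
def Claim_equal_cleaner : Prop := ∀ (villages : List String), Dom_cleaner villages → Spec_cleaner villages (cleaner villages)

-- ===== LEMMAS AND PROOFS =====

-- set(xs) appended one element at a time
theorem ofList_append_singleton (l : List String) (x : String) :
    PySem.Set.ofList (l ++ [x]) = PySem.Set.add (PySem.Set.ofList l) x := by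
  rw [PySem.Set.ofList_eq_foldl, PySem.Set.ofList_eq_foldl, List.foldl_append]
  rfl

-- the distinct elements in first-occurrence order have strictly increasing first indices
theorem pairwise_idxOf_ofList (xs : List String) :
    (PySem.Set.ofList xs).Pairwise (fun a b => List.idxOf a xs < List.idxOf b xs) := by
  induction xs using List.reverseRecOn with
  | nil => simp [PySem.Set.ofList]
  | append_singleton l x ih =>
    rw [ofList_append_singleton]
    have hmem : ∀ a ∈ PySem.Set.ofList l, a ∈ l := by
      intro a ha; exact (PySem.Set.mem_ofList l a).mp ha
    have hidx : ∀ a ∈ PySem.Set.ofList l, List.idxOf a (l ++ [x]) = List.idxOf a l := by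
      intro a ha; rw [List.idxOf_append, if_pos (hmem a ha)]
    by_cases hx : PySem.Set.contains (PySem.Set.ofList l) x
    · rw [PySem.Set.add, if_pos hx]
      exact List.Pairwise.imp_of_mem (fun {a b} ha hb h => by
        rw [hidx a ha, hidx b hb]; exact h) ih
    · rw [PySem.Set.add, if_neg hx]
      have hxl : x ∉ l := by
        intro h
        exact hx (by simpa [PySem.Set.contains] using (PySem.Set.mem_ofList l x).mpr h)
      rw [List.pairwise_append]
      refine ⟨List.Pairwise.imp_of_mem (fun {a b} ha hb h => by
        rw [hidx a ha, hidx b hb]; exact h) ih, List.pairwise_singleton _ _, ?_⟩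
      intro a ha b hb
      rw [List.mem_singleton] at hb
      have hxidx : List.idxOf x (l ++ [x]) = l.length := by
        rw [List.idxOf_append, if_neg hxl]; simp
      rw [hb, hidx a ha, hxidx]
      exact List.idxOf_lt_length_of_mem (hmem a ha)

-- B's sort-by-first-index of the distinct tokens IS the ordered dedup
theorem sorted_ofList_idxOf (xs : List String) :
    PySem.List.sorted (PySem.Set.ofList xs) (fun t => List.idxOf t xs)
      = PySem.List.dedup xs := by
  rw [PySem.List.sorted_eq_of_perm_of_pairwise_lt (PySem.Set.ofList xs) (PySem.Set.ofList xs)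
    (fun t => List.idxOf t xs) (List.Perm.refl _) (pairwise_idxOf_ofList xs)]
  rw [PySem.List.dedup_eq_ofList]

-- A's inner dedup loop computes the ordered dedup of the stripped tokens
theorem dedup_loop_eq (xs : List String) :
    xs.foldl (fun (l : List String) x =>
        if l.contains (PySem.Str.strip x) then l else l ++ [PySem.Str.strip x]) []
      = PySem.List.dedup (xs.map PySem.Str.strip) := by
  rw [PySem.List.dedup_eq_ofList, PySem.Set.ofList_eq_foldl, List.foldl_map]
  rfl

-- the per-village body of A's loop is B's dedupV
theorem body_eq (v : String) :
    (if ((pySplitComma v).foldl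
          (fun (l : List String) x =>
            if l.contains (PySem.Str.strip x) then l else l ++ [PySem.Str.strip x]) []).length > 1
      then PySem.Str.strip (PySem.Str.join ", "
          ((pySplitComma v).foldl
            (fun (l : List String) x =>
              if l.contains (PySem.Str.strip x) then l else l ++ [PySem.Str.strip x]) []))
      else ((pySplitComma v).foldl
            (fun (l : List String) x =>
              if l.contains (PySem.Str.strip x) then l else l ++ [PySem.Str.strip x]) []).headD "")
    = dedupV v := by
  rw [dedup_loop_eq]
  simp only [dedupV]
  rw [sorted_ofList_idxOf]

theorem cleaner_loop (vs : List String) (c : Int) (acc : List String) :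
    vs.foldl (fun acc v =>
      if PySem.Str.isIn "," v then
        let l := (pySplitComma v).foldl
          (fun (l : List String) x =>
            if l.contains (PySem.Str.strip x) then l else l ++ [PySem.Str.strip x]) []
        let v' := if l.length > 1 then PySem.Str.strip (PySem.Str.join ", " l) else l.headD ""
        (acc.1 + 1, acc.2 ++ [v'])
      else (acc.1, acc.2 ++ [v])) (c, acc)
    = (c + (vs.countP (fun v => PySem.Str.isIn "," v) : Int),
       acc ++ vs.map (fun v => if PySem.Str.isIn "," v then dedupV v else v)) := by
  induction vs generalizing c acc with
  | nil => simp
  | cons v vs ih =>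
    by_cases h : PySem.Str.isIn "," v = true
    · simp only [List.foldl_cons, if_pos h, ih, List.countP_cons, List.map_cons]
      rw [body_eq v]
      refine Prod.ext ?_ ?_
      · simp; ring
      · simp
    · simp only [List.foldl_cons, if_neg h, ih, List.countP_cons, List.map_cons]
      refine Prod.ext ?_ ?_
      · simp
      · simp

-- ===== VERDICT =====
theorem cleaner_spec : Claim_equal_cleaner := by
  intro villages _
  unfold Spec_cleaner cleaner cleaner_alt
  rw [cleaner_loop]
  simp
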